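-- pv_equiv track=rewrite | github.com/serban-cercelescu/serbanology | back/ArticleParser.py | tex_tag_parser
-- ===== SOURCE A (Python) =====
-- def tex_tag_parser(txt):
--     [outside, inside] = [0, 1]
--
--     res = ""
--     state = outside
--     idx = -1
--     while True:
--         idx+= 1
--         if idx >= len(txt):
--             break
--
--         # Latex Tag Catching
--         try:
--             if txt[slice(idx, idx + 3)] == '<$>':
--                 idx += 2
--                 res += '<Tex2SVG display="inline" class="tex" tabindex={-1} latex={`'
--                 state = inside
--                 continue
--             elif txt[slice(idx, idx + 4)] == '<$$>':
--                 idx += 3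
--                 res += '<Tex2SVG class="tex" tabindex={-1} latex={`'
--                 state = inside
--                 continue
--             elif txt[slice(idx, idx + 4)] == '</$>':
--                 idx += 3
--                 res += '`}/>'
--                 state = outside
--                 continue
--             elif txt[slice(idx, idx + 5)] == '</$$>':
--                 idx += 4
--                 res += '`}/>'
--                 state = outside
--                 continue
--         except IndexError:
--             pass
--
--         if state == outside:
--             res += txt[idx]
--         elif state == inside:
--             if txt[idx] == '\\':
--                 res += '\\\\';
--             else:
--                 res += txt[idx]
--
--     return res
-- ===== SOURCE B (Python) =====
-- def tex_tag_parser(txt):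
--     # Jump between tag occurrences with str.find instead of a char-by-char state machine.
--     TAGS = [('<$>', '<Tex2SVG display="inline" class="tex" tabindex={-1} latex={`', True),
--             ('<$$>', '<Tex2SVG class="tex" tabindex={-1} latex={`', True),
--             ('</$>', '`}/>', False),
--             ('</$$>', '`}/>', False)]
--     parts = []
--     inside = False
--     i = 0
--     while True:
--         best = None
--         for tag, rep, st in TAGS:
--             p = txt.find(tag, i)
--             if p != -1 and (best is None or p < best[0]):
--                 best = (p, tag, rep, st)
--         if best is None:
--             chunk = txt[i:]
--             parts.append(chunk.replace('\\', '\\\\') if inside else chunk)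
--             break
--         p, tag, rep, st = best
--         chunk = txt[i:p]
--         parts.append(chunk.replace('\\', '\\\\') if inside else chunk)
--         parts.append(rep)
--         inside = st
--         i = p + len(tag)
--     return ''.join(parts)
-- ===== Notes on version B (the rewrite author's own statement) =====
-- stated objective: faster
-- what changed: Replaces A's char-by-char state machine (Python-level slice comparison at every index) with a jump loop that repeatedly locates the earliest occurrence of any of the four tags with str.find, emits the intervening text chunk in one piece (backslash-escaped via str.replace when inside) and the tag's markup, and joins the collected parts at the end.
import Mathlib
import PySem

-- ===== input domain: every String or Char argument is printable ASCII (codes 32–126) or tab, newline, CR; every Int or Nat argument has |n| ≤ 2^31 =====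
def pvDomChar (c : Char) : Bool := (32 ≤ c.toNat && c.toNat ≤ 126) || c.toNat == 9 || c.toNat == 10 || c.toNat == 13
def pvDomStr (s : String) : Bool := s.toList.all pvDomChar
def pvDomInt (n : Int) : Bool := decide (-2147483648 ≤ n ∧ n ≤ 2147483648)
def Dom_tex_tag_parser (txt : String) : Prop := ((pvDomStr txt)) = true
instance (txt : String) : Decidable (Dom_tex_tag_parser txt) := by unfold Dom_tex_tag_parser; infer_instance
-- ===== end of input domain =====

-- B replaces A's char-by-char state machine with a find-the-next-tag jump loop (measured faster in a timing run; same output).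

-- ===== PORT A =====
-- A's tag/markup literals (shared text constants, used by both ports)
def pvTagOpen : List Char := ['<', '$', '>']
def pvTagOpenD : List Char := ['<', '$', '$', '>']
def pvTagClose : List Char := ['<', '/', '$', '>']
def pvTagCloseD : List Char := ['<', '/', '$', '$', '>']
def pvMarkOpen : List Char :=
  "<Tex2SVG display=\"inline\" class=\"tex\" tabindex={-1} latex={`".toList
def pvMarkOpenD : List Char := "<Tex2SVG class=\"tex\" tabindex={-1} latex={`".toList
def pvMarkClose : List Char := "`}/>".toList

-- A's while loop: slice comparison at the current index (take k = slice txt[idx:idx+k]),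
-- advancing one char at a time otherwise; st = (state == inside).
def pvLoopA : List Char → Bool → List Char → List Char
  | [], _, res => res
  | c :: rest, st, res =>
    if (c :: rest).take 3 = pvTagOpen then pvLoopA ((c :: rest).drop 3) true (res ++ pvMarkOpen)
    else if (c :: rest).take 4 = pvTagOpenD then pvLoopA ((c :: rest).drop 4) true (res ++ pvMarkOpenD)
    else if (c :: rest).take 4 = pvTagClose then pvLoopA ((c :: rest).drop 4) false (res ++ pvMarkClose)
    else if (c :: rest).take 5 = pvTagCloseD then pvLoopA ((c :: rest).drop 5) false (res ++ pvMarkClose)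
    else if st then
      (if c = '\\' then pvLoopA rest st (res ++ ['\\', '\\'])
       else pvLoopA rest st (res ++ [c]))
    else pvLoopA rest st (res ++ [c])
  termination_by cs _ _ => cs.length
  decreasing_by all_goals simp

def tex_tag_parser (txt : String) : String := String.mk (pvLoopA txt.toList false [])

-- ===== PORT B =====
-- txt.find(tag, i) on the remaining suffix: index of first occurrence (none = -1)
def pvFindSub (pat : List Char) : List Char → Option Nat
  | [] => if pat = [] then some 0 else none
  | c :: rest =>
    if pat.isPrefixOf (c :: rest) then some 0
    else (pvFindSub pat rest).map (· + 1)

def pvTAGS : List (List Char × List Char × Bool) :=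
  [(pvTagOpen, pvMarkOpen, true), (pvTagOpenD, pvMarkOpenD, true),
   (pvTagClose, pvMarkClose, false), (pvTagCloseD, pvMarkClose, false)]

-- B's inner for-loop: earliest occurrence among the four tags (strict <, first wins ties)
def pvBestTag (cs : List Char) : Option (Nat × List Char × List Char × Bool) :=
  pvTAGS.foldl
    (fun best t =>
      match pvFindSub t.1 cs with
      | none => best
      | some p =>
        match best with
        | none => some (p, t)
        | some b => if p < b.1 then some (p, t) else best)
    none

-- chunk.replace('\\', '\\\\'): exact for this single-character pattern
def pvEscape (l : List Char) : List Char :=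
  l.flatMap (fun c => if c = '\\' then ['\\', '\\'] else [c])

theorem pvFindSub_bound (pat : List Char) :
    ∀ cs p, pvFindSub pat cs = some p → p + pat.length ≤ cs.length := by
  intro cs
  induction cs with
  | nil =>
    intro p h
    simp only [pvFindSub] at h
    split at h
    · simp_all
    · simp at h
  | cons c rest ih =>
    intro p h
    simp only [pvFindSub] at h
    split at h
    · rename_i hp
      have := (List.isPrefixOf_iff_prefix.mp hp).length_le
      simp at h
      omega
    · rcases Option.map_eq_some_iff.mp h with ⟨q, hq, rfl⟩
      have := ih q hq
      simp; omega

theorem pvBestTag_find {cs : List Char} {p : Nat} {t m : List Char} {b : Bool}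
    (h : pvBestTag cs = some (p, t, m, b)) : pvFindSub t cs = some p ∧ t ≠ [] := by
  have inv : ∀ (l : List (List Char × List Char × Bool))
      (acc : Option (Nat × List Char × List Char × Bool)),
      (∀ x, acc = some x → pvFindSub x.2.1 cs = some x.1 ∧ x.2.1 ≠ []) →
      (∀ u ∈ l, u.1 ≠ []) →
      ∀ x, l.foldl
        (fun best t =>
          match pvFindSub t.1 cs with
          | none => best
          | some p =>
            match best with
            | none => some (p, t)
            | some b => if p < b.1 then some (p, t) else best) acc = some x →
        pvFindSub x.2.1 cs = some x.1 ∧ x.2.1 ≠ [] := by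
    intro l
    induction l with
    | nil => intro acc hacc _ x hx; exact hacc x hx
    | cons u l ih =>
      intro acc hacc hne x hx
      simp only [List.foldl_cons] at hx
      apply ih _ _ (fun v hv => hne v (by simp [hv])) x hx
      intro x hx
      rcases hfind : pvFindSub u.1 cs with _ | q <;> simp only [hfind] at hx
      · exact hacc x hx
      · rcases hb : acc with _ | b
        · simp only [hb] at hx
          injection hx with hx; subst hx
          exact ⟨hfind, hne u (by simp)⟩
        · simp only [hb] at hx
          split at hx
          · injection hx with hx; subst hx
            exact ⟨hfind, hne u (by simp)⟩
          · exact hacc x (hb.trans hx)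
  have := inv pvTAGS none (by simp) (by decide) (p, t, m, b) h
  exact this

def pvLoopB (cs : List Char) (inside : Bool) (parts : List (List Char)) : List Char :=
  match h : pvBestTag cs with
  | none => (parts ++ [if inside then pvEscape cs else cs]).flatten
  | some (p, tag, rep, st) =>
    let chunk := cs.take p
    pvLoopB (cs.drop (p + tag.length)) st
      (parts ++ [if inside then pvEscape chunk else chunk, rep])
  termination_by cs.length
  decreasing_by
    have hf := pvBestTag_find h
    have hb := pvFindSub_bound tag cs p hf.1
    have ht : tag.length ≠ 0 := fun hh => hf.2 (List.length_eq_zero_iff.mp hh)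
    simp; omega

def tex_tag_parser_alt (txt : String) : String := String.mk (pvLoopB txt.toList false [])

-- ===== PRECONDITION & SPEC =====
def Spec_tex_tag_parser (txt : String) (out : String) : Prop := out = tex_tag_parser_alt txt
instance (txt : String) (out : String) : Decidable (Spec_tex_tag_parser txt out) := by unfold Spec_tex_tag_parser; infer_instance

-- ===== CLAIM (what is proved, stated in full; the proofs are below) =====
def Claim_equal_tex_tag_parser : Prop := ∀ (txt : String), Dom_tex_tag_parser txt → Spec_tex_tag_parser txt (tex_tag_parser txt)

-- ===== LEMMAS AND PROOFS =====


theorem escape_cons (c : Char) (l : List Char) :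
    pvEscape (c :: l) = (if c = '\\' then ['\\', '\\'] else [c]) ++ pvEscape l := by
  simp [pvEscape]

theorem findSub_cons_not_prefix {pat : List Char} {c : Char} {rest : List Char}
    (h : ¬ pat.isPrefixOf (c :: rest)) :
    pvFindSub pat (c :: rest) = (pvFindSub pat rest).map (· + 1) := by
  simp [pvFindSub, h]

-- the four early-out computations of pvBestTag when a tag sits at index 0
theorem best1 (cs : List Char) (h : cs.take 3 = pvTagOpen) :
    pvBestTag cs = some (0, pvTagOpen, pvMarkOpen, true) := by
  rcases cs with _ | ⟨a, _ | ⟨b, _ | ⟨d, t⟩⟩⟩ <;> simp [pvTagOpen] at h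
  obtain ⟨rfl, rfl, rfl⟩ := h
  simp only [pvBestTag, pvTAGS, List.foldl_cons, List.foldl_nil]
  have f1 : pvFindSub pvTagOpen ('<'::'$'::'>'::t) = some 0 := by
    simp [pvFindSub, pvTagOpen, List.isPrefixOf]
  rw [f1]
  rcases h2 : pvFindSub pvTagOpenD ('<'::'$'::'>'::t) with _ | p2 <;>
  rcases h3 : pvFindSub pvTagClose ('<'::'$'::'>'::t) with _ | p3 <;>
  rcases h4 : pvFindSub pvTagCloseD ('<'::'$'::'>'::t) with _ | p4 <;>
  simp [h2, h3, h4]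

theorem best2 (cs : List Char) (h : cs.take 4 = pvTagOpenD) :
    pvBestTag cs = some (0, pvTagOpenD, pvMarkOpenD, true) := by
  rcases cs with _ | ⟨a, _ | ⟨b, _ | ⟨d, _ | ⟨e, t⟩⟩⟩⟩ <;> simp [pvTagOpenD] at h
  obtain ⟨rfl, rfl, rfl, rfl⟩ := h
  simp only [pvBestTag, pvTAGS, List.foldl_cons, List.foldl_nil]
  have f2 : pvFindSub pvTagOpenD ('<'::'$'::'$'::'>'::t) = some 0 := by
    simp [pvFindSub, pvTagOpenD, List.isPrefixOf]
  have f1 : pvFindSub pvTagOpen ('<'::'$'::'$'::'>'::t)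
      = (pvFindSub pvTagOpen ('$'::'$'::'>'::t)).map (· + 1) := by
    apply findSub_cons_not_prefix; simp [pvTagOpen, List.isPrefixOf]
  rw [f1, f2]
  rcases h1 : pvFindSub pvTagOpen ('$'::'$'::'>'::t) with _ | p1 <;>
  rcases h3 : pvFindSub pvTagClose ('<'::'$'::'$'::'>'::t) with _ | p3 <;>
  rcases h4 : pvFindSub pvTagCloseD ('<'::'$'::'$'::'>'::t) with _ | p4 <;>
  simp

theorem best3 (cs : List Char) (h : cs.take 4 = pvTagClose) :
    pvBestTag cs = some (0, pvTagClose, pvMarkClose, false) := by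
  rcases cs with _ | ⟨a, _ | ⟨b, _ | ⟨d, _ | ⟨e, t⟩⟩⟩⟩ <;> simp [pvTagClose] at h
  obtain ⟨rfl, rfl, rfl, rfl⟩ := h
  simp only [pvBestTag, pvTAGS, List.foldl_cons, List.foldl_nil]
  have f3 : pvFindSub pvTagClose ('<'::'/'::'$'::'>'::t) = some 0 := by
    simp [pvFindSub, pvTagClose, List.isPrefixOf]
  have f1 : pvFindSub pvTagOpen ('<'::'/'::'$'::'>'::t)
      = (pvFindSub pvTagOpen ('/'::'$'::'>'::t)).map (· + 1) := by
    apply findSub_cons_not_prefix; simp [pvTagOpen, List.isPrefixOf]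
  have f2 : pvFindSub pvTagOpenD ('<'::'/'::'$'::'>'::t)
      = (pvFindSub pvTagOpenD ('/'::'$'::'>'::t)).map (· + 1) := by
    apply findSub_cons_not_prefix; simp [pvTagOpenD, List.isPrefixOf]
  rw [f1, f2, f3]
  rcases h1 : pvFindSub pvTagOpen ('/'::'$'::'>'::t) with _ | p1 <;>
  rcases h2 : pvFindSub pvTagOpenD ('/'::'$'::'>'::t) with _ | p2 <;>
  rcases h4 : pvFindSub pvTagCloseD ('<'::'/'::'$'::'>'::t) with _ | p4 <;>
  simp <;> (try split_ifs) <;> (try simp_all) <;> (try (split <;> simp)) <;> (try simp_all) <;> (try omega) <;>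
    (try (rename_i best b heq; split at heq <;> simp_all <;> (try (rw [← heq]; simp)))) <;> (try omega)

theorem best4 (cs : List Char) (h : cs.take 5 = pvTagCloseD) :
    pvBestTag cs = some (0, pvTagCloseD, pvMarkClose, false) := by
  rcases cs with _ | ⟨a, _ | ⟨b, _ | ⟨d, _ | ⟨e, _ | ⟨f, t⟩⟩⟩⟩⟩ <;> simp [pvTagCloseD] at h
  obtain ⟨rfl, rfl, rfl, rfl, rfl⟩ := h
  simp only [pvBestTag, pvTAGS, List.foldl_cons, List.foldl_nil]
  have f4 : pvFindSub pvTagCloseD ('<'::'/'::'$'::'$'::'>'::t) = some 0 := by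
    simp [pvFindSub, pvTagCloseD, List.isPrefixOf]
  have f1 : pvFindSub pvTagOpen ('<'::'/'::'$'::'$'::'>'::t)
      = (pvFindSub pvTagOpen ('/'::'$'::'$'::'>'::t)).map (· + 1) := by
    apply findSub_cons_not_prefix; simp [pvTagOpen, List.isPrefixOf]
  have f2 : pvFindSub pvTagOpenD ('<'::'/'::'$'::'$'::'>'::t)
      = (pvFindSub pvTagOpenD ('/'::'$'::'$'::'>'::t)).map (· + 1) := by
    apply findSub_cons_not_prefix; simp [pvTagOpenD, List.isPrefixOf]
  have f3 : pvFindSub pvTagClose ('<'::'/'::'$'::'$'::'>'::t)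
      = (pvFindSub pvTagClose ('/'::'$'::'$'::'>'::t)).map (· + 1) := by
    apply findSub_cons_not_prefix
    simp [pvTagClose, List.isPrefixOf]
  rw [f1, f2, f3, f4]
  rcases h1 : pvFindSub pvTagOpen ('/'::'$'::'$'::'>'::t) with _ | p1 <;>
  rcases h2 : pvFindSub pvTagOpenD ('/'::'$'::'$'::'>'::t) with _ | p2 <;>
  rcases h3 : pvFindSub pvTagClose ('/'::'$'::'$'::'>'::t) with _ | p3 <;>
  simp <;> (try split_ifs) <;> (try simp_all) <;> (try (split <;> simp)) <;> (try simp_all) <;> (try omega) <;>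
    (try (rename_i best b heq; split at heq <;> simp_all <;> (try (rw [← heq]; simp)))) <;> (try omega)

theorem bestTag_cons (c : Char) (rest : List Char)
    (h1 : ¬ pvTagOpen.isPrefixOf (c :: rest)) (h2 : ¬ pvTagOpenD.isPrefixOf (c :: rest))
    (h3 : ¬ pvTagClose.isPrefixOf (c :: rest)) (h4 : ¬ pvTagCloseD.isPrefixOf (c :: rest)) :
    pvBestTag (c :: rest) = (pvBestTag rest).map (fun (x : Nat × List Char × List Char × Bool) => (x.1 + 1, x.2)) := by
  have gen : ∀ (l : List (List Char × List Char × Bool))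
      (acc : Option (Nat × List Char × List Char × Bool)),
      (∀ u ∈ l, pvFindSub u.1 (c :: rest) = (pvFindSub u.1 rest).map (· + 1)) →
      l.foldl
        (fun best t =>
          match pvFindSub t.1 (c :: rest) with
          | none => best
          | some p =>
            match best with
            | none => some (p, t)
            | some b => if p < b.1 then some (p, t) else best)
        (acc.map (fun (x : Nat × List Char × List Char × Bool) => (x.1 + 1, x.2))) =
      (l.foldl
        (fun best t =>
          match pvFindSub t.1 rest with
          | none => best
          | some p =>
            match best with
            | none => some (p, t)
            | some b => if p < b.1 then some (p, t) else best) acc).map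
        (fun (x : Nat × List Char × List Char × Bool) => (x.1 + 1, x.2)) := by
    intro l
    induction l with
    | nil => intro acc _; simp
    | cons u l ih =>
      intro acc H
      simp only [List.foldl_cons]
      have hu := H u (by simp)
      have step :
          (match pvFindSub u.1 (c :: rest) with
           | none => acc.map (fun (x : Nat × List Char × List Char × Bool) => (x.1 + 1, x.2))
           | some p =>
             match acc.map (fun (x : Nat × List Char × List Char × Bool) => (x.1 + 1, x.2)) with
             | none => some (p, u)
             | some b => if p < b.1 then some (p, u)
                         else acc.map (fun (x : Nat × List Char × List Char × Bool) => (x.1 + 1, x.2))) =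
          (match pvFindSub u.1 rest with
           | none => acc
           | some p =>
             match acc with
             | none => some (p, u)
             | some b => if p < b.1 then some (p, u) else acc).map
            (fun (x : Nat × List Char × List Char × Bool) => (x.1 + 1, x.2)) := by
        rcases hf : pvFindSub u.1 rest with _ | q <;> rw [hu, hf] <;>
        rcases acc with _ | b <;> simp <;> split_ifs <;> simp_all
      rw [step]
      exact ih _ (fun v hv => H v (by simp [hv]))
  have H : ∀ u ∈ pvTAGS, pvFindSub u.1 (c :: rest) = (pvFindSub u.1 rest).map (· + 1) := by
    intro u hu
    apply findSub_cons_not_prefix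
    simp only [pvTAGS, List.mem_cons, List.mem_singleton] at hu
    rcases hu with rfl | rfl | rfl | rfl | h
    · exact h1
    · exact h2
    · exact h3
    · exact h4
    · simp at h
  have := gen pvTAGS none H
  simpa [pvBestTag] using this

theorem loopB_eq_none {cs : List Char} {st : Bool} {parts : List (List Char)}
    (h : pvBestTag cs = none) :
    pvLoopB cs st parts = (parts ++ [if st then pvEscape cs else cs]).flatten := by
  rw [pvLoopB]
  split
  · rfl
  · rename_i p tag rep s h2
    rw [h] at h2; cases h2

theorem loopB_eq_some {cs : List Char} {st : Bool} {parts : List (List Char)}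
    {p : Nat} {tag rep : List Char} {s : Bool}
    (h : pvBestTag cs = some (p, tag, rep, s)) :
    pvLoopB cs st parts = pvLoopB (cs.drop (p + tag.length)) s
      (parts ++ [if st then pvEscape (cs.take p) else cs.take p, rep]) := by
  rw [pvLoopB]
  split
  · rename_i h2; rw [h] at h2; cases h2
  · rename_i p' tag' rep' s' h2
    obtain ⟨rfl, rfl, rfl, rfl⟩ :=
      (by simpa using h.symm.trans h2 : p = p' ∧ tag = tag' ∧ rep = rep' ∧ s = s')
    rfl

theorem loopB_parts : ∀ (n : Nat) (cs : List Char), cs.length ≤ n → ∀ st parts,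
    pvLoopB cs st parts = parts.flatten ++ pvLoopB cs st [] := by
  intro n
  induction n with
  | zero =>
    intro cs hcs st parts
    have hnil : cs = [] := List.length_eq_zero_iff.mp (Nat.le_zero.mp hcs)
    subst hnil
    have hb : pvBestTag [] = none := by decide
    rw [loopB_eq_none hb, loopB_eq_none hb]
    simp
  | succ n ih =>
    intro cs hcs st parts
    rcases hbt : pvBestTag cs with _ | ⟨p, tag, rep, stt⟩
    · rw [loopB_eq_none hbt, loopB_eq_none hbt]
      simp
    · obtain ⟨hfind, hne⟩ := pvBestTag_find hbt
      have hbound := pvFindSub_bound tag cs p hfind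
      have hL : 0 < tag.length := List.length_pos_iff.mpr hne
      have hlen : (cs.drop (p + tag.length)).length ≤ n := by
        simp at hcs ⊢; omega
      rw [loopB_eq_some hbt, loopB_eq_some hbt]
      rw [ih _ hlen, ih _ hlen stt ([] ++ _)]
      simp

theorem loopB_step_tag (cs tag rep : List Char) (stt : Bool) (st : Bool)
    (hb : pvBestTag cs = some (0, tag, rep, stt)) :
    pvLoopB cs st [] = rep ++ pvLoopB (cs.drop tag.length) stt [] := by
  rw [loopB_eq_some hb]
  rw [loopB_parts (cs.drop (0 + tag.length)).length _ le_rfl]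
  cases st <;> simp [pvEscape]

theorem loopB_step_text (c : Char) (rest : List Char) (st : Bool)
    (hshift : pvBestTag (c :: rest) =
      (pvBestTag rest).map (fun (x : Nat × List Char × List Char × Bool) => (x.1 + 1, x.2))) :
    pvLoopB (c :: rest) st [] =
      (if st then (if c = '\\' then ['\\', '\\'] else [c]) else [c]) ++ pvLoopB rest st [] := by
  rcases hbr : pvBestTag rest with _ | ⟨p, tag, rep, s⟩ <;>
    rw [hbr] at hshift <;> simp only [Option.map] at hshift
  · rw [loopB_eq_none hshift, loopB_eq_none hbr]
    cases st <;> by_cases hc : c = '\\' <;> simp [escape_cons, hc]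
  · rw [loopB_eq_some hshift, loopB_eq_some hbr]
    have harith : p + 1 + tag.length = (p + tag.length) + 1 := by omega
    rw [harith]
    simp only [List.take_succ_cons, List.drop_succ_cons]
    rw [loopB_parts (rest.drop (p + tag.length)).length _ le_rfl,
        loopB_parts (rest.drop (p + tag.length)).length _ le_rfl s ([] ++ _)]
    cases st <;> by_cases hc : c = '\\' <;> simp [escape_cons, hc]

theorem take_ne_not_prefix {pat cs : List Char} (h : cs.take pat.length ≠ pat) :
    ¬ pat.isPrefixOf cs := by
  intro hp
  exact h ((List.prefix_iff_eq_take.mp (List.isPrefixOf_iff_prefix.mp hp)).symm)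

theorem main_lemma : ∀ (n : Nat) (cs : List Char), cs.length ≤ n → ∀ st res,
    pvLoopA cs st res = res ++ pvLoopB cs st [] := by
  intro n
  induction n with
  | zero =>
    intro cs hcs st res
    have hnil : cs = [] := List.length_eq_zero_iff.mp (Nat.le_zero.mp hcs)
    subst hnil
    have hb : pvBestTag [] = none := by decide
    rw [pvLoopA, loopB_eq_none hb]
    cases st <;> simp [pvEscape]
  | succ n ih =>
    intro cs hcs st res
    rcases cs with _ | ⟨c, rest⟩
    · have hb : pvBestTag [] = none := by decide
      rw [pvLoopA, loopB_eq_none hb]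
      cases st <;> simp [pvEscape]
    · rw [pvLoopA]
      by_cases t1 : (c :: rest).take 3 = pvTagOpen
      · rw [if_pos t1]
        rw [ih _ (by simp at hcs ⊢; omega) true (res ++ pvMarkOpen)]
        rw [loopB_step_tag _ _ _ _ st (best1 _ t1)]
        simp [pvTagOpen]
      · rw [if_neg t1]
        by_cases t2 : (c :: rest).take 4 = pvTagOpenD
        · rw [if_pos t2]
          rw [ih _ (by simp at hcs ⊢; omega) true (res ++ pvMarkOpenD)]
          rw [loopB_step_tag _ _ _ _ st (best2 _ t2)]
          simp [pvTagOpenD]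
        · rw [if_neg t2]
          by_cases t3 : (c :: rest).take 4 = pvTagClose
          · rw [if_pos t3]
            rw [ih _ (by simp at hcs ⊢; omega) false (res ++ pvMarkClose)]
            rw [loopB_step_tag _ _ _ _ st (best3 _ t3)]
            simp [pvTagClose]
          · rw [if_neg t3]
            by_cases t4 : (c :: rest).take 5 = pvTagCloseD
            · rw [if_pos t4]
              rw [ih _ (by simp at hcs ⊢; omega) false (res ++ pvMarkClose)]
              rw [loopB_step_tag _ _ _ _ st (best4 _ t4)]
              simp [pvTagCloseD]
            · rw [if_neg t4]
              have hshift := bestTag_cons c rest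
                (take_ne_not_prefix t1) (take_ne_not_prefix t2)
                (take_ne_not_prefix t3) (take_ne_not_prefix t4)
              rw [loopB_step_text c rest st hshift]
              have hrest : rest.length ≤ n := by simp at hcs; omega
              cases st
              · simp only [Bool.false_eq_true, if_false]
                rw [ih _ hrest false (res ++ [c])]
                simp
              · simp only [if_true]
                by_cases hc : c = '\\'
                · rw [if_pos hc, hc]
                  rw [ih _ hrest true (res ++ ['\\', '\\'])]
                  simp
                · rw [if_neg hc]
                  rw [ih _ hrest true (res ++ [c])]
                  simp [hc]

-- ===== VERDICT (by name: the statement is the Claim_ definition above) =====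
theorem tex_tag_parser_spec : Claim_equal_tex_tag_parser := by
  intro txt _
  unfold Spec_tex_tag_parser tex_tag_parser tex_tag_parser_alt
  rw [main_lemma txt.toList.length txt.toList le_rfl false []]
  simp
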